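-- pv_equiv track=rewrite | github.com/mohamadsolkhannawawi/informatics-practicum-portfolio | Semester-1/Programming-Fundamentals/07-Programming-Fundamentals/KodeBerharga.py | ConvertSTOI
-- ===== SOURCE A (Python) =====
-- def Konso(e,L):
--     if L == []:
--         return [e]
--     else:
--         return [e] + L
--
-- def IsEmpty(L):
--     return L == []
--
-- def FirstElmt(L):
--     if L == [] :
--         return None
--     else:
--         return L[0]
--
-- def Tail(L):
--     if L == []:
--         return []
--     else:
--         return L[1:]
--
-- def IsMember(X,L):
--     if IsEmpty(L):
--         return False
--     elif X == FirstElmt(L):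
--         return True
--     else:
--         return IsMember(X,Tail(L))
--
-- def ConvertSTOI(s):
--     StringToList = list('0123456789')
--     if not s:
--         return []
--     elif IsMember(FirstElmt(s), StringToList):
--         if FirstElmt(s) == '1':
--             return Konso(1, ConvertSTOI(Tail(s)))
--         elif FirstElmt(s) == '2':
--             return Konso(2, ConvertSTOI(Tail(s)))
--         elif FirstElmt(s) == '3':
--             return Konso(3, ConvertSTOI(Tail(s)))
--         elif FirstElmt(s) == '4':
--             return Konso(4, ConvertSTOI(Tail(s)))
--         elif FirstElmt(s) == '5':
--             return Konso(5, ConvertSTOI(Tail(s)))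
--         elif FirstElmt(s) == '6':
--             return Konso(6, ConvertSTOI(Tail(s)))
--         elif FirstElmt(s) == '7':
--             return Konso(7, ConvertSTOI(Tail(s)))
--         elif FirstElmt(s) == '8':
--             return Konso(8, ConvertSTOI(Tail(s)))
--         elif FirstElmt(s) == '9':
--             return Konso(9, ConvertSTOI(Tail(s)))
--         elif FirstElmt(s) == '0':
--             return Konso(0, ConvertSTOI(Tail(s)))
--     else:
--         return ConvertSTOI(Tail(s))
-- ===== SOURCE B (Python) =====
-- def ConvertSTOI(s):
--     result = []
--     for ch in s:
--         if ch in "0123456789":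
--             result.append(int(ch))
--     return result
-- ===== Notes on version B (the rewrite author's own statement) =====
-- stated objective: faster
-- what changed: Replaces A's self-recursion with helper functions (Konso consing, IsMember linear scan per character) by a single iterative accumulator loop over the string.
import Mathlib
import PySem

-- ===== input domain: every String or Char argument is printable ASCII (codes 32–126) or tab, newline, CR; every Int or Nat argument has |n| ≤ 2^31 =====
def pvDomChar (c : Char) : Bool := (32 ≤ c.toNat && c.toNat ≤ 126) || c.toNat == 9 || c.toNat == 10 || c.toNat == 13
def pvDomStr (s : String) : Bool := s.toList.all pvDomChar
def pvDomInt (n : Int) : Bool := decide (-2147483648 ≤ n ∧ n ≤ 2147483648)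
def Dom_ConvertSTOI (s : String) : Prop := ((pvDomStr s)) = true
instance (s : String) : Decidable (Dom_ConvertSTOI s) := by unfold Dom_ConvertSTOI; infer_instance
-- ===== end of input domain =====

-- B replaces A's self-recursion (with Konso/IsMember helpers) by one iterative accumulator loop.

-- ===== PORT A =====
def pyKonso (e : Int) (L : List Int) : List Int :=
  if L = [] then [e] else [e] ++ L

def pyIsMember (x : Char) (L : List Char) : Bool :=
  match L with
  | [] => false
  | h :: t => if x == h then true else pyIsMember x t

def convertA : List Char → List Int
  | [] => []
  | c :: rest =>
    if pyIsMember c ((['0','1','2','3','4','5','6','7','8','9'] : List Char)) then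
      if c == '1' then pyKonso 1 (convertA rest)
      else if c == '2' then pyKonso 2 (convertA rest)
      else if c == '3' then pyKonso 3 (convertA rest)
      else if c == '4' then pyKonso 4 (convertA rest)
      else if c == '5' then pyKonso 5 (convertA rest)
      else if c == '6' then pyKonso 6 (convertA rest)
      else if c == '7' then pyKonso 7 (convertA rest)
      else if c == '8' then pyKonso 8 (convertA rest)
      else if c == '9' then pyKonso 9 (convertA rest)
      else if c == '0' then pyKonso 0 (convertA rest)
      else []  -- unreachable: pyIsMember guarantees c is one of the ten digits
    else convertA rest

def ConvertSTOI (s : String) : List Int := convertA s.toList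

-- ===== PORT B =====
-- int(ch) for a single digit ch is ord(ch) - 48; exact on '0'..'9'
def ConvertSTOI_alt (s : String) : List Int :=
  s.toList.foldl
    (fun acc c =>
      if ((['0','1','2','3','4','5','6','7','8','9'] : List Char)).contains c then acc ++ [((c.toNat : Int) - 48)] else acc)
    []

-- ===== PRECONDITION & SPEC =====
def Spec_ConvertSTOI (s : String) (out : List Int) : Prop := out = ConvertSTOI_alt s
instance (s : String) (out : List Int) : Decidable (Spec_ConvertSTOI s out) := by unfold Spec_ConvertSTOI; infer_instance

-- ===== CLAIM (what is proved, stated in full; the proofs are below) =====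
def Claim_equal_ConvertSTOI : Prop := ∀ (s : String), Dom_ConvertSTOI s → Spec_ConvertSTOI s (ConvertSTOI s)

-- ===== LEMMAS AND PROOFS =====
theorem pyIsMember_eq_contains (x : Char) (L : List Char) :
    pyIsMember x L = L.contains x := by
  induction L with
  | nil => simp [pyIsMember]
  | cons h t ih => by_cases hx : x == h <;> simp_all [pyIsMember]

theorem foldl_eq_convertA (l : List Char) (acc : List Int) :
    l.foldl
      (fun acc c =>
        if ((['0','1','2','3','4','5','6','7','8','9'] : List Char)).contains c then acc ++ [((c.toNat : Int) - 48)] else acc)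
      acc = acc ++ convertA l := by
  induction l generalizing acc with
  | nil => simp [convertA]
  | cons c rest ih =>
    rw [List.foldl_cons, ih]
    by_cases h : ((['0','1','2','3','4','5','6','7','8','9'] : List Char)).contains c
    · have hmem : c ∈ (['0','1','2','3','4','5','6','7','8','9'] : List Char) := by
        simpa using h
      fin_cases hmem <;>
        · simp only [convertA, pyIsMember_eq_contains]
          norm_num [pyKonso]
          cases convertA rest <;> rfl
    · have hF : ((['0','1','2','3','4','5','6','7','8','9'] : List Char)).contains c = false := by
        simpa using h
      have hcv : convertA (c :: rest) = convertA rest := by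
        simp only [convertA, pyIsMember_eq_contains]
        rw [hF]
        simp
      rw [hcv]
      have : (if ((['0','1','2','3','4','5','6','7','8','9'] : List Char)).contains c = true
              then acc ++ [((c.toNat : Int) - 48)] else acc) = acc := by
        rw [hF]; simp
      rw [this]

-- ===== VERDICT (by name: the statement is the Claim_ definition above) =====
theorem ConvertSTOI_spec : Claim_equal_ConvertSTOI := by
  intro s _
  unfold Spec_ConvertSTOI ConvertSTOI ConvertSTOI_alt
  simpa using (foldl_eq_convertA s.toList []).symm
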